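-- pv_equiv track=rewrite | github.com/tuttlepc9/UFUU | 20260412/20260412_session_2/Universality_tests/basin_entropy_decoherence.py | get_final_attractor
-- ===== SOURCE A (Python) =====
-- p = 17
--
-- def modular_fold(left_g: int, right_g: int) -> int:
--     return (left_g * right_g + left_g + 1) % p
--
-- def get_final_attractor(g_start: int) -> str:
--     """Run full gauge iteration and return clean label: 'FP4', 'FP13', or 'CYCLE-X'"""
--     x = g_start
--     seen = {}
--     orbit = []
--     for step in range(100):
--         if x in seen:
--             cycle_start = seen[x]
--             cycle = orbit[cycle_start:]
--             if len(cycle) == 1: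
--                 return f"FP{cycle[0]}"
--             else:
--                 return f"CYCLE{len(cycle)}"
--         seen[x] = step
--         orbit.append(x)
--         x = modular_fold(x, x)   # g → g*g + g + 1 mod 17
--     return "UNKNOWN"
-- ===== SOURCE B (Python) =====
-- p = 17
--
-- def modular_fold(left_g: int, right_g: int) -> int:
--     return (left_g * right_g + left_g + 1) % p
--
-- def get_final_attractor(g_start: int) -> str:
--     """Floyd tortoise-and-hare: find the cycle of g -> g*g + g + 1 mod p."""
--     slow = modular_fold(g_start, g_start)
--     fast = modular_fold(slow, slow)
--     while slow != fast:
--         slow = modular_fold(slow, slow)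
--         fast = modular_fold(modular_fold(fast, fast), modular_fold(fast, fast))
--     # slow is on the cycle; walk once around to measure its length
--     lam = 1
--     x = modular_fold(slow, slow)
--     while x != slow:
--         x = modular_fold(x, x)
--         lam += 1
--     return f"FP{slow}" if lam == 1 else f"CYCLE{lam}"
-- ===== Notes on version B (the rewrite author's own statement) =====
-- stated objective: alternative
-- what changed: Replaces A's seen-dict plus orbit-list bookkeeping with Floyd's tortoise-and-hare cycle detection, keeping only two pointers and a counter (O(1) extra space instead of O(orbit)).
import Mathlib
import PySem

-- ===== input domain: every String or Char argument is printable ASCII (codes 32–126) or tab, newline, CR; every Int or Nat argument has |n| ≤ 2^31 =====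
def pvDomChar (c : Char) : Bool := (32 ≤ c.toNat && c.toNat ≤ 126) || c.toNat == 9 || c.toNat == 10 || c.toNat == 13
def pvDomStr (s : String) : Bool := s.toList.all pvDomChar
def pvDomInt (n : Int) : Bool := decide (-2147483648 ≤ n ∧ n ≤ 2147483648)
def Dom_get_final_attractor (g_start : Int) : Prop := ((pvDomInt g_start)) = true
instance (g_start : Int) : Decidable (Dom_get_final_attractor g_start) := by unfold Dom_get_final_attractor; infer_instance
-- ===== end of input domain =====

-- B replaces A's seen-dict/orbit-list bookkeeping by Floyd's tortoise-and-hare cycle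
-- detection (pointers and a counter only); equal return values, objective: alternative.

-- ===== PORT A =====
-- module helper: modular_fold(left_g, right_g) = (left_g*right_g + left_g + 1) % p, p = 17
def modular_fold (left_g right_g : Int) : Int :=
  PySem.Int.mod (left_g * right_g + left_g + 1) 17

-- the 'for step in range(100)' loop of A, with early return; fuel = remaining steps
def loopA : Nat → Int → PySem.Dict Int Int → List Int → Int → String
  | 0, _, _, _, _ => "UNKNOWN"
  | fuel+1, x, seen, orbit, step =>
    match seen.get? x with
    | some cycle_start =>
        let cycle := PySem.List.slice orbit (some cycle_start) none
        if cycle.length = 1 then "FP" ++ PySem.Int.toStr cycle.headI   -- cycle[0], guarded by len == 1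
        else "CYCLE" ++ PySem.Int.toStr (cycle.length : Int)
    | none => loopA fuel (modular_fold x x) (seen.insert x step) (orbit ++ [x]) (step + 1)

def get_final_attractor (g_start : Int) : String :=
  loopA 100 g_start PySem.Dict.empty [] 0

-- ===== PORT B =====
-- advance slow once, fast twice, until they meet (fuel guard only; never exhausted here)
def floydMeet : Nat → Int → Int → Int
  | 0, slow, _ => slow
  | fuel+1, slow, fast =>
    if slow = fast then slow
    else floydMeet fuel (modular_fold slow slow)
           (modular_fold (modular_fold fast fast) (modular_fold fast fast))

-- walk once around the cycle from the meeting point, counting steps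
def cycleLen : Nat → Int → Int → Int → Int
  | 0, _, _, lam => lam
  | fuel+1, x, slow, lam =>
    if x = slow then lam else cycleLen fuel (modular_fold x x) slow (lam + 1)

def get_final_attractor_alt (g_start : Int) : String :=
  let slow0 := modular_fold g_start g_start
  let slow := floydMeet 100 slow0 (modular_fold slow0 slow0)
  let lam := cycleLen 100 (modular_fold slow slow) slow 1
  if lam = 1 then "FP" ++ PySem.Int.toStr slow
  else "CYCLE" ++ PySem.Int.toStr lam

-- ===== PRECONDITION & SPEC =====
def Spec_get_final_attractor (g_start : Int) (out : String) : Prop := out = get_final_attractor_alt g_start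
instance (g_start : Int) (out : String) : Decidable (Spec_get_final_attractor g_start out) := by unfold Spec_get_final_attractor; infer_instance

-- ===== CLAIM (what is proved, stated in full; the proofs are below) =====
def Claim_equal_get_final_attractor : Prop := ∀ (g_start : Int), Dom_get_final_attractor g_start → Spec_get_final_attractor g_start (get_final_attractor g_start)

-- ===== LEMMAS AND PROOFS =====

-- modular_fold g g only depends on g mod 17
lemma fold_mod (g : Int) :
    modular_fold g g = modular_fold (PySem.Int.mod g 17) (PySem.Int.mod g 17) := by
  have h17 : (0:Int) < 17 := by norm_num
  simp only [modular_fold, PySem.Int.mod_eq_emod_of_pos h17]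
  have h : g % 17 % 17 = g % 17 := Int.emod_emod_of_dvd g dvd_rfl
  have hm : Int.ModEq 17 g (g % 17) := h.symm
  exact (((hm.mul hm).add hm).add (Int.ModEq.refl 1))

-- the A-loop only consults dict keys in [0,17): dicts agreeing there give equal runs
lemma loopA_congr_dict (fuel : Nat) :
    ∀ (x step : Int) (d1 d2 : PySem.Dict Int Int) (orbit : List Int),
    0 ≤ x → x < 17 → (∀ k : Int, 0 ≤ k → k < 17 → d1.get? k = d2.get? k) →
    loopA fuel x d1 orbit step = loopA fuel x d2 orbit step := by
  induction fuel with
  | zero => intro x step d1 d2 orbit _ _ _; rfl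
  | succ n ih =>
    intro x step d1 d2 orbit hx0 hx1 hd
    simp only [loopA, hd x hx0 hx1]
    cases hcase : d2.get? x with
    | some cs => rfl
    | none =>
      apply ih
      · exact PySem.Int.mod_nonneg _ (by norm_num)
      · exact PySem.Int.mod_lt _ (by norm_num)
      · intro k hk0 hk1
        rw [PySem.Dict.get?_insert, PySem.Dict.get?_insert]
        split
        · rfl
        · exact hd k hk0 hk1

-- ===== VERDICT (by name: the statement is the Claim_ definition above) =====
theorem get_final_attractor_spec : Claim_equal_get_final_attractor := by
  intro g _
  unfold Spec_get_final_attractor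
  by_cases hsmall : 0 ≤ g ∧ g < 17
  · obtain ⟨h0, h1⟩ := hsmall
    interval_cases g <;> decide
  · have hout : g < 0 ∨ 17 ≤ g := by omega
    have hr0 : 0 ≤ PySem.Int.mod g 17 := PySem.Int.mod_nonneg _ (by norm_num)
    have hr1 : PySem.Int.mod g 17 < 17 := PySem.Int.mod_lt _ (by norm_num)
    have key := fold_mod g
    have hgA : get_final_attractor g
        = loopA 99 (modular_fold g g) (PySem.Dict.empty.insert g 0) [g] 1 := rfl
    have hghost : ∀ y : Int, 0 ≤ y → y < 17 →
        loopA 99 y (PySem.Dict.empty.insert g 0) [g] 1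
          = loopA 99 y PySem.Dict.empty [g] 1 := by
      intro y hy0 hy1
      apply loopA_congr_dict 99 y 1 _ _ [g] hy0 hy1
      intro k hk0 hk1
      rw [PySem.Dict.get?_insert, if_neg (by omega)]
    have hy0 : 0 ≤ modular_fold g g := PySem.Int.mod_nonneg _ (by norm_num)
    have hy1 : modular_fold g g < 17 := PySem.Int.mod_lt _ (by norm_num)
    have hB : get_final_attractor_alt g
        = get_final_attractor_alt (PySem.Int.mod g 17) := by
      simp only [get_final_attractor_alt, key]
    rw [hgA, hghost _ hy0 hy1, key, hB]
    have : PySem.Int.mod g 17 = 0 ∨ PySem.Int.mod g 17 = 1 ∨ PySem.Int.mod g 17 = 2 ∨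
        PySem.Int.mod g 17 = 3 ∨ PySem.Int.mod g 17 = 4 ∨ PySem.Int.mod g 17 = 5 ∨
        PySem.Int.mod g 17 = 6 ∨ PySem.Int.mod g 17 = 7 ∨ PySem.Int.mod g 17 = 8 ∨
        PySem.Int.mod g 17 = 9 ∨ PySem.Int.mod g 17 = 10 ∨ PySem.Int.mod g 17 = 11 ∨
        PySem.Int.mod g 17 = 12 ∨ PySem.Int.mod g 17 = 13 ∨ PySem.Int.mod g 17 = 14 ∨
        PySem.Int.mod g 17 = 15 ∨ PySem.Int.mod g 17 = 16 := by omega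
    rcases this with h|h|h|h|h|h|h|h|h|h|h|h|h|h|h|h|h <;> rw [h] <;> rfl
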